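-- pv_equiv track=rewrite | github.com/pushpa-info-14/python-programming | LeetCode/3500-3750/Q3623 Count Number of Trapezoids I.py | countTrapezoids2
-- ===== SOURCE A (Python) =====
-- from collections import defaultdict
-- from typing import List
--
-- def countTrapezoids2(points: List[List[int]]) -> int:
--     mod = 10 ** 9 + 7
--     intercepts = defaultdict(int)
--     for point in points:
--         intercepts[point[1]] += 1
--     total_sum = 0
--     res = 0
--     for x in intercepts.values():
--         edge = x * (x - 1) // 2
--         res = (res + edge * total_sum) % mod
--         total_sum = (total_sum + edge) % mod
--     return res
-- ===== SOURCE B (Python) =====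
-- def countTrapezoids2(points):
--     mod = 10 ** 9 + 7
--     ys = [p[1] for p in points]
--     edges = [ys.count(y) * (ys.count(y) - 1) // 2 for y in dict.fromkeys(ys)]
--     s = sum(edges) % mod
--     q = sum(e * e for e in edges) % mod
--     return (s * s - q) % mod * ((mod + 1) // 2) % mod
-- ===== Notes on version B (the rewrite author's own statement) =====
-- stated objective: alternative
-- what changed: Drops A's counting dict and incremental pairwise accumulation (res += edge*running_sum per level) entirely: B lists the y-values, takes the distinct ones, gets each level's multiplicity by list.count, and finishes with the closed-form identity sum_{i<j} e_i e_j = (S^2 - Q) * inv(2) mod p over plain sums S and Q of the edge list.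
import Mathlib
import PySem

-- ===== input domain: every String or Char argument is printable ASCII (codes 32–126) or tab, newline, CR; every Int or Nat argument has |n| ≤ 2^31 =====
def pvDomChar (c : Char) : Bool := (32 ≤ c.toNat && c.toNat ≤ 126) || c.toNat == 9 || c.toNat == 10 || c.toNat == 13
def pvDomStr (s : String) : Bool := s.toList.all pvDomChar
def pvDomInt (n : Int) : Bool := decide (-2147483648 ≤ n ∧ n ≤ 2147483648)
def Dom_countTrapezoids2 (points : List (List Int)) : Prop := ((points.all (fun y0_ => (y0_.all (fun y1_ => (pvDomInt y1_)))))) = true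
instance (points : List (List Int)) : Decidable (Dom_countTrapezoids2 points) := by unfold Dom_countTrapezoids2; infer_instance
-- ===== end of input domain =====

-- B drops A's counting dict and running-sum loop: distinct y-levels via dict.fromkeys,
-- multiplicities via list.count, then the closed form (S^2 - Q)*inv2 mod p; objective: alternative.

-- ===== PORT A =====
-- A's loop body over the dict values: state (res, total_sum), edge = x*(x-1)//2,
-- res = (res + edge * total_sum) % mod; total_sum = (total_sum + edge) % mod.
def pvStepA (st : Int × Int) (x : Int) : Int × Int :=
  let edge := PySem.Int.floordiv (x * (x - 1)) 2
  (PySem.Int.mod (st.1 + edge * st.2) 1000000007, PySem.Int.mod (st.2 + edge) 1000000007)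

-- literal port of A: build the y-count dict (defaultdict increment), run the running-sum loop.
def countTrapezoids2 (points : List (List Int)) : Int :=
  let intercepts : PySem.Dict Int Int :=
    points.foldl (fun d point => d.modify (PySem.List.pyGetD point 1 0) 0 (· + 1)) PySem.Dict.empty
  (intercepts.values.foldl pvStepA (0, 0)).1

-- ===== PORT B =====
-- literal port of Source B: ys =列of y's, edges over dict.fromkeys(ys) (= PySem.List.dedup) with
-- multiplicity ys.count(y), plain sums s and q, then (s*s - q) % mod * ((mod+1)//2) % mod.
def countTrapezoids2_alt (points : List (List Int)) : Int :=
  let ys := points.map (fun p => PySem.List.pyGetD p 1 0)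
  let edges := (PySem.List.dedup ys).map
    (fun y => PySem.Int.floordiv ((ys.count y : Int) * ((ys.count y : Int) - 1)) 2)
  let s := PySem.Int.mod edges.sum 1000000007
  let q := PySem.Int.mod (edges.map (fun e => e * e)).sum 1000000007
  PySem.Int.mod (PySem.Int.mod (s * s - q) 1000000007 *
    PySem.Int.floordiv (1000000007 + 1) 2) 1000000007

-- ===== PRECONDITION & SPEC =====
-- Pre_ excludes exactly the inputs where Python A raises IndexError: a point with fewer
-- than two coordinates (point[1] out of range).
def Pre_countTrapezoids2 (points : List (List Int)) : Prop :=
  ∀ point ∈ points, 2 ≤ point.length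
instance (points : List (List Int)) : Decidable (Pre_countTrapezoids2 points) := by
  unfold Pre_countTrapezoids2; infer_instance

def pvWitness_countTrapezoids2 : List (List Int) :=
  [[0, 1], [2, 1], [5, 1], [0, 2], [3, 2], [7, 0]]

def Spec_countTrapezoids2 (points : List (List Int)) (out : Int) : Prop :=
  out = countTrapezoids2_alt points
instance (points : List (List Int)) (out : Int) : Decidable (Spec_countTrapezoids2 points out) := by
  unfold Spec_countTrapezoids2; infer_instance

-- ===== CLAIM (what is proved, stated in full; the proofs are below) =====
def Claim_equal_countTrapezoids2 : Prop :=
  ∀ (points : List (List Int)), Dom_countTrapezoids2 points → Pre_countTrapezoids2 points →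
    Spec_countTrapezoids2 points (countTrapezoids2 points)

-- ===== LEMMAS AND PROOFS =====

-- casting an Int reduced mod 1000000007 into ZMod 1000000007 forgets the reduction
lemma pv_cast_mod (a : Int) :
    ((a % (1000000007 : Int) : Int) : ZMod 1000000007) = (a : ZMod 1000000007) := by
  have := ZMod.intCast_mod a 1000000007
  norm_num at this
  exact this

-- edge as a function, shared by the statements below
def pvEdge (x : Int) : Int := PySem.Int.floordiv (x * (x - 1)) 2

-- Invariant of A's loop: after folding vs from (r, t), the result lies in [0, m) and
-- 2·res ≡ 2r + 2·t·E + (E² − Q) (mod m), with E, Q the exact sums of edges / squared edges.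
lemma pv_loop (vs : List Int) :
    ∀ (r t : Int), 0 ≤ r → r < 1000000007 →
      let a := vs.foldl pvStepA (r, t)
      0 ≤ a.1 ∧ a.1 < 1000000007 ∧
      ((2 * a.1 : Int) : ZMod 1000000007)
        = ((2 * r : Int) : ZMod 1000000007)
          + 2 * ((t : Int) : ZMod 1000000007) * (((vs.map pvEdge).sum : Int) : ZMod 1000000007)
          + ((((vs.map pvEdge).sum : Int) : ZMod 1000000007) ^ 2
             - (((vs.map (fun x => pvEdge x * pvEdge x)).sum : Int) : ZMod 1000000007)) := by
  induction vs with
  | nil =>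
      intro r t hr0 hr1
      refine ⟨hr0, hr1, ?_⟩
      simp
  | cons x vs ih =>
      intro r t hr0 hr1
      have hmodA : ∀ a : Int, PySem.Int.mod a 1000000007 = a % 1000000007 :=
        fun a => PySem.Int.mod_eq_emod_of_pos (by norm_num : (0:Int) < 1000000007)
      simp only [List.foldl_cons]
      obtain ⟨h0, h1, heq⟩ :=
        ih (PySem.Int.mod (r + pvEdge x * t) 1000000007)
           (PySem.Int.mod (t + pvEdge x) 1000000007)
           (by rw [hmodA]; omega) (by rw [hmodA]; omega)
      refine ⟨h0, h1, ?_⟩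
      rw [show (pvStepA (r, t) x)
          = (PySem.Int.mod (r + pvEdge x * t) 1000000007,
             PySem.Int.mod (t + pvEdge x) 1000000007) from rfl]
      rw [heq]
      simp only [hmodA, List.map_cons, List.sum_cons]
      push_cast [pv_cast_mod]
      ring
  termination_by vs => vs.length

-- A's final result equals B's closed-form expression over the same multiplicity list vs.
lemma pv_final (vs : List Int) :
    (vs.foldl pvStepA (0, 0)).1
      = PySem.Int.mod (PySem.Int.mod
          (PySem.Int.mod (vs.map pvEdge).sum 1000000007 *
             PySem.Int.mod (vs.map pvEdge).sum 1000000007 -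
           PySem.Int.mod ((vs.map pvEdge).map (fun e => e * e)).sum 1000000007)
          1000000007 * PySem.Int.floordiv (1000000007 + 1) 2) 1000000007 := by
  obtain ⟨ha0, ha1, hinv⟩ := pv_loop vs 0 0 (by norm_num) (by norm_num)
  set a := vs.foldl pvStepA (0, 0)
  have hmodA : ∀ a : Int, PySem.Int.mod a 1000000007 = a % 1000000007 :=
    fun a => PySem.Int.mod_eq_emod_of_pos (by norm_num : (0:Int) < 1000000007)
  have hinv2 : PySem.Int.floordiv (1000000007 + 1) 2 = 500000004 := by decide
  have hsq : ((vs.map pvEdge).map (fun e => e * e)) = vs.map (fun x => pvEdge x * pvEdge x) := by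
    simp [List.map_map, Function.comp]
  simp only [hmodA, hinv2, hsq]
  set E := (vs.map pvEdge).sum
  set Q := (vs.map (fun x => pvEdge x * pvEdge x)).sum
  have hcast : ((a.1 : Int) : ZMod 1000000007)
      = (((E % 1000000007 * (E % 1000000007) - Q % 1000000007) % 1000000007
           * 500000004 % 1000000007 : Int) : ZMod 1000000007) := by
    push_cast [pv_cast_mod]
    have h2 : ((500000004 : ZMod 1000000007) * 2) = 1 := by decide
    calc ((a.1 : Int) : ZMod 1000000007)
        = (2 * ((a.1 : Int) : ZMod 1000000007)) * 500000004 := by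
          rw [mul_comm (2 : ZMod 1000000007), mul_assoc, mul_comm (2 : ZMod 1000000007), h2,
            mul_one]
      _ = ((E : ZMod 1000000007) * E - Q) * 500000004 := by
          push_cast at hinv
          rw [show ((2 : ZMod 1000000007) * (a.1 : Int)) = 2 * ((a.1 : Int) : ZMod 1000000007)
              from rfl] at *
          rw [hinv]; ring
      _ = _ := by ring
  have hme := (ZMod.intCast_eq_intCast_iff _ _ 1000000007).mp hcast
  unfold Int.ModEq at hme
  norm_num at hme
  omega

-- A's counting dict over points IS Counter(ys): its values list is the per-distinct-y counts.
lemma pv_values (points : List (List Int)) :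
    (points.foldl (fun d point => d.modify (PySem.List.pyGetD point 1 0) 0 (· + 1))
        (PySem.Dict.empty : PySem.Dict Int Int)).values
      = (PySem.List.dedup (points.map (fun p => PySem.List.pyGetD p 1 0))).map
          (fun y => ((points.map (fun p => PySem.List.pyGetD p 1 0)).count y : Int)) := by
  have h1 : points.foldl (fun d point => d.modify (PySem.List.pyGetD point 1 0) 0 (· + 1))
        (PySem.Dict.empty : PySem.Dict Int Int)
      = PySem.Dict.counter (points.map (fun p => PySem.List.pyGetD p 1 0)) := by
    rw [PySem.Dict.counter_eq_foldl, List.foldl_map]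
  rw [h1]
  have h2 := PySem.Dict.items_counter (points.map (fun p => PySem.List.pyGetD p 1 0))
  have : (PySem.Dict.counter (points.map (fun p => PySem.List.pyGetD p 1 0))).values
      = (PySem.Dict.counter (points.map (fun p => PySem.List.pyGetD p 1 0))).items.map (·.2) :=
    rfl
  rw [this, h2]
  simp [List.map_map, Function.comp, PySem.List.dedup_eq_ofList]

-- ===== VERDICT (by name: the statement is the Claim_ definition above) =====
theorem countTrapezoids2_spec : Claim_equal_countTrapezoids2 := by
  intro points _ _
  show countTrapezoids2 points = countTrapezoids2_alt points
  simp only [countTrapezoids2, countTrapezoids2_alt]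
  rw [pv_values, pv_final]
  simp [List.map_map, Function.comp_def, pvEdge, PySem.Int.floordiv, PySem.Int.mod]
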